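-- pv_equiv track=rewrite | github.com/greengraca/ca_match_logger | caMatchLogger.py | paginate_entries
-- ===== SOURCE A (Python) =====
-- MAX_CHARS = 2000
--
-- PAGE_HEADER = "**\ud83d\udcdc Full Game Dump:**\n"
--
-- def paginate_entries(entries: list[str]) -> list[str]:
--     pages = []
--     current_page = PAGE_HEADER
--     for entry in entries:
--         entry = entry.strip()
--         if len(current_page) + len(entry) + 1 > MAX_CHARS:
--             pages.append(current_page.strip())
--             current_page = PAGE_HEADER + entry + "\n"
--         else:
--             current_page += entry + "\n"
--     if current_page.strip() != PAGE_HEADER.strip():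
--         pages.append(current_page.strip())
--     return pages
-- ===== SOURCE B (Python) =====
-- MAX_CHARS = 2000
--
-- PAGE_HEADER = "**\ud83d\udcdc Full Game Dump:**\n"
--
--
-- def _render(group):
--     return (PAGE_HEADER + "".join(e + "\n" for e in group)).strip()
--
--
-- def paginate_entries(entries: list[str]) -> list[str]:
--     # Pass 1: partition stripped entries into budget-limited groups.
--     closed = []
--     cur = []
--     running = len(PAGE_HEADER)
--     for raw in entries:
--         e = raw.strip()
--         if running + len(e) + 1 > MAX_CHARS:
--             closed.append(cur)
--             cur = [e]
--             running = len(PAGE_HEADER) + len(e) + 1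
--         else:
--             cur.append(e)
--             running += len(e) + 1
--     # Pass 2: render every closed group; keep the final group only if non-header-only.
--     pages = [_render(g) for g in closed]
--     last = _render(cur)
--     if last != PAGE_HEADER.strip():
--         pages.append(last)
--     return pages
-- ===== Notes on version B (the rewrite author's own statement) =====
-- stated objective: alternative
-- what changed: B is a two-pass decomposition: it first partitions the stripped entries into groups under a running character budget (never building page strings in the loop), then renders each group as header+joined-entries in a second pass, filtering only the final header-only group; A builds and strips page strings inline in one loop.
import Mathlib
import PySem

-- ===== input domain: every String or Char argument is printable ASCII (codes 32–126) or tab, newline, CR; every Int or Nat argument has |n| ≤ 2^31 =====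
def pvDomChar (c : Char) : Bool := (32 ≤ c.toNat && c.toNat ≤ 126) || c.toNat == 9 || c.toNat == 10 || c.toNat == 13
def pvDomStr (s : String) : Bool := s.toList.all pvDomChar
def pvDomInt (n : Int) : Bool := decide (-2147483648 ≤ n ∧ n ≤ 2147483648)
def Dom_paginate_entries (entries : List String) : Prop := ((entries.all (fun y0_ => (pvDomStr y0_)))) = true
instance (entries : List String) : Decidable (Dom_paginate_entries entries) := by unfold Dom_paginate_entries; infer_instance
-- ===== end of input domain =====

-- B re-decomposes A's single page-string-building loop into two passes (group the stripped entries
-- under a character budget, then render each group); same return value, no speed claim.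

-- Python's PAGE_HEADER literal is two LONE SURROGATES "\ud83d\udcdc" plus ASCII; Lean strings hold
-- scalar values, so the pair is represented by the one scalar '📜', and pvPyLen counts it as 2 so
-- that lengths match Python's len exactly (all other admitted characters are ASCII and count 1).
def pvHeader : List Char := "**📜 Full Game Dump:**\n".toList

def pvPyLen (cs : List Char) : Nat := (cs.map (fun c => if 65536 ≤ c.toNat then 2 else 1)).sum

-- ===== PORT A =====
-- one loop step of A: strip the entry, close the page on overflow else extend it
def pvStepA (s : List String × List Char) (entry : String) : List String × List Char :=
  let e := PySem.Chars.strip entry.toList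
  if pvPyLen s.2 + pvPyLen e + 1 > 2000 then
    (s.1 ++ [String.mk (PySem.Chars.strip s.2)], (pvHeader ++ e) ++ ['\n'])
  else (s.1, (s.2 ++ e) ++ ['\n'])

def paginate_entries (entries : List String) : List String :=
  let r := entries.foldl pvStepA ([], pvHeader)
  if PySem.Chars.strip r.2 = PySem.Chars.strip pvHeader then r.1
  else r.1 ++ [String.mk (PySem.Chars.strip r.2)]

-- ===== PORT B =====
-- _render: header plus the group's entries each followed by '\n' ("".join ported as flatten of map), stripped
def pvRender (g : List (List Char)) : List Char :=
  PySem.Chars.strip (pvHeader ++ (g.map (fun e => e ++ ['\n'])).flatten)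

-- one step of B's pass 1: state (closed groups, current group, running length)
def pvStepB (s : List (List (List Char)) × List (List Char) × Nat) (raw : String) :
    List (List (List Char)) × List (List Char) × Nat :=
  let e := PySem.Chars.strip raw.toList
  if s.2.2 + pvPyLen e + 1 > 2000 then
    (s.1 ++ [s.2.1], [e], pvPyLen pvHeader + pvPyLen e + 1)
  else
    (s.1, s.2.1 ++ [e], s.2.2 + pvPyLen e + 1)

def paginate_entries_alt (entries : List String) : List String :=
  let r := entries.foldl pvStepB ([], [], pvPyLen pvHeader)
  let pages := r.1.map (fun g => String.mk (pvRender g))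
  let last := pvRender r.2.1
  if last = PySem.Chars.strip pvHeader then pages else pages ++ [String.mk last]

-- ===== PRECONDITION & SPEC =====
def Spec_paginate_entries (entries : List String) (out : List String) : Prop := out = paginate_entries_alt entries
instance (entries : List String) (out : List String) : Decidable (Spec_paginate_entries entries out) := by unfold Spec_paginate_entries; infer_instance

-- ===== CLAIM (what is proved, stated in full; the proofs are below) =====
def Claim_equal_paginate_entries : Prop := ∀ (entries : List String), Dom_paginate_entries entries → Spec_paginate_entries entries (paginate_entries entries)

-- ===== LEMMAS AND PROOFS =====
-- the page string A's loop holds when B's current group is g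
def pvPageOf (g : List (List Char)) : List Char :=
  pvHeader ++ (g.map (fun e => e ++ ['\n'])).flatten

lemma pvPyLen_append (a b : List Char) : pvPyLen (a ++ b) = pvPyLen a + pvPyLen b := by
  simp [pvPyLen]

lemma pvPageOf_append (g : List (List Char)) (e : List Char) :
    pvPageOf (g ++ [e]) = (pvPageOf g ++ e) ++ ['\n'] := by
  simp [pvPageOf, List.append_assoc]

lemma pvPageOf_single (e : List Char) : pvPageOf [e] = (pvHeader ++ e) ++ ['\n'] := by
  simp [pvPageOf, List.append_assoc]

lemma pvPyLen_pageOf_append (g : List (List Char)) (e : List Char) :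
    pvPyLen (pvPageOf (g ++ [e])) = pvPyLen (pvPageOf g) + pvPyLen e + 1 := by
  rw [pvPageOf_append, pvPyLen_append, pvPyLen_append]
  rfl

lemma pvPyLen_pageOf_single (e : List Char) :
    pvPyLen (pvPageOf [e]) = pvPyLen pvHeader + pvPyLen e + 1 := by
  rw [pvPageOf_single, pvPyLen_append, pvPyLen_append]
  rfl

lemma pvRender_eq_strip_pageOf (g : List (List Char)) :
    pvRender g = PySem.Chars.strip (pvPageOf g) := rfl

-- loop correspondence: A's fold over (pages, page string) tracks B's fold over (closed, group, running)
lemma pvInv (es : List String) (P : List String) (closed : List (List (List Char)))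
    (g : List (List Char)) :
    es.foldl pvStepA (P ++ closed.map (fun c => String.mk (pvRender c)), pvPageOf g)
      = (P ++ ((es.foldl pvStepB (closed, g, pvPyLen (pvPageOf g))).1.map
            (fun c => String.mk (pvRender c))),
         pvPageOf (es.foldl pvStepB (closed, g, pvPyLen (pvPageOf g))).2.1) := by
  induction es generalizing closed g with
  | nil => rfl
  | cons x t ih =>
    simp only [List.foldl_cons]
    by_cases h : pvPyLen (pvPageOf g) + pvPyLen (PySem.Chars.strip x.toList) + 1 > 2000
    · rw [show pvStepA (P ++ closed.map (fun c => String.mk (pvRender c)), pvPageOf g) x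
            = (P ++ (closed ++ [g]).map (fun c => String.mk (pvRender c)), pvPageOf [PySem.Chars.strip x.toList]) by
          simp [pvStepA, h, pvPageOf_single, pvRender_eq_strip_pageOf]]
      rw [show pvStepB (closed, g, pvPyLen (pvPageOf g)) x
            = (closed ++ [g], [PySem.Chars.strip x.toList], pvPyLen (pvPageOf [PySem.Chars.strip x.toList])) by
          simp [pvStepB, h, pvPyLen_pageOf_single]]
      exact ih _ _
    · rw [show pvStepA (P ++ closed.map (fun c => String.mk (pvRender c)), pvPageOf g) x
            = (P ++ closed.map (fun c => String.mk (pvRender c)), pvPageOf (g ++ [PySem.Chars.strip x.toList])) by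
          simp [pvStepA, h, pvPageOf_append]]
      rw [show pvStepB (closed, g, pvPyLen (pvPageOf g)) x
            = (closed, g ++ [PySem.Chars.strip x.toList], pvPyLen (pvPageOf (g ++ [PySem.Chars.strip x.toList]))) by
          simp [pvStepB, h, pvPyLen_pageOf_append]]
      exact ih _ _

-- ===== VERDICT (by name: the statement is the Claim_ definition above) =====
theorem paginate_entries_spec : Claim_equal_paginate_entries := by
  intro entries _
  unfold Spec_paginate_entries paginate_entries paginate_entries_alt
  have h := pvInv entries [] [] []
  simp only [List.map_nil, List.nil_append, List.flatten_nil, List.append_nil, pvPageOf] at h ⊢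
  rw [h]
  simp only [pvRender]
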